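-- pv_equiv track=rewrite | github.com/fuadnuri/programming | problems/marriage_problem.py | gale_shapley
-- ===== SOURCE A (Python) =====
-- from typing import Dict,List
--
-- def gale_shapley(m_pref:Dict,w_pref:Dict)->Dict:
--
--     engagement:Dict=dict()
--     single_men:List=[man for man in m_pref.keys()]
--     womens_rank:Dict={
--         w:{m:w_pref[w].index(m) for m in w_pref[w]} for w in w_pref
--     }
--     proposals:Dict={
--         m:0 for  m in single_men
--     }
--     while single_men:
--         man=single_men.pop(0)
--
--         woman=m_pref[man][proposals[man]]
--         proposals[man]+=1
--         if woman not in engagement: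
--             engagement[woman]=man
--         else:
--             if womens_rank[woman][man] < womens_rank[woman][engagement[woman]]:
--                 dumped = engagement[woman]
--                 engagement[woman]=man
--                 single_men.append(dumped)
--
--             else:
--                 single_men.append(man)
--
--
--     return engagement
-- ===== SOURCE B (Python) =====
-- def gale_shapley(m_pref, w_pref):
--     # rank tables in one enumerate pass per woman (setdefault keeps the first
--     # occurrence, like list.index); the queue carries each man's remaining
--     # preference suffix instead of a proposal counter.
--     womens_rank = {}
--     for w, prefs in w_pref.items():
--         rank = {}
--         for i, m in enumerate(prefs):
--             rank.setdefault(m, i)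
--         womens_rank[w] = rank
--     engagement = {}                      # woman -> (man, his still-untried women)
--     queue = [(m, list(prefs)) for m, prefs in m_pref.items()]
--     while queue:
--         man, prefs = queue.pop(0)
--         woman, rest = prefs[0], prefs[1:]
--         if woman not in engagement:
--             engagement[woman] = (man, rest)
--         else:
--             rank = womens_rank[woman]
--             holder, holder_rest = engagement[woman]
--             if rank[man] < rank[holder]:
--                 engagement[woman] = (man, rest)
--                 queue.append((holder, holder_rest))
--             else:
--                 queue.append((man, rest))
--     return {w: mr[0] for w, mr in engagement.items()}
-- ===== Notes on version B (the rewrite author's own statement) =====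
-- stated objective: alternative
-- what changed: B drops A's proposal-counter dict and per-woman repeated list.index scans: the work queue carries each man's remaining-preference suffix (stored alongside the holder in engagement), and each woman's rank table is built in a single enumerate/setdefault pass instead of one .index scan per entry (O(k) instead of O(k^2) per woman's table), yielding the identical dict in the identical insertion order.
import Mathlib
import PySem

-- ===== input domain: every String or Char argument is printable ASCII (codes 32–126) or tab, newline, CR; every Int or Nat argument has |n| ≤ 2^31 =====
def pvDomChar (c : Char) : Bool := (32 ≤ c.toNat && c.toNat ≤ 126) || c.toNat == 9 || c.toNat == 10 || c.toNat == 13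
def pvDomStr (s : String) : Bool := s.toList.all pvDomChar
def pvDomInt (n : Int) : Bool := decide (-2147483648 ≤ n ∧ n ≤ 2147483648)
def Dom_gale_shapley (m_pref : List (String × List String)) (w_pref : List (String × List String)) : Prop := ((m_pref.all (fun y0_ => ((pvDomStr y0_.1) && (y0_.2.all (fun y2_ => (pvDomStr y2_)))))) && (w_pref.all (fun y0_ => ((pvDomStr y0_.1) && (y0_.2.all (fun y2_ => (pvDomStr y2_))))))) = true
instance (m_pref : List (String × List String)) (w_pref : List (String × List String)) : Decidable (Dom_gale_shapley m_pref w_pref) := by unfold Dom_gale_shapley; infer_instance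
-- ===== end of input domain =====

-- B replaces A's proposal-counter dict and repeated list.index scans by a queue that
-- carries each man's remaining-preference suffix and rank tables built in one
-- enumerate pass per woman; the equivalence is exact (same dict, same insertion order).

-- first-match lookup in an association list (= Python dict subscript on the parameter dicts)
def pvLookup {α : Type} (l : List (String × α)) (k : String) : Option α :=
  (l.find? (fun p => p.1 == k)).map (fun p => p.2)

-- ===== PORT A =====

-- {m: w_pref[w].index(m) for m in w_pref[w]} ; every m is drawn from lst, so
-- list.index never raises and the `.getD 0` default is never consulted.
def gsRankRowA (lst : List String) : PySem.Dict String Int :=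
  lst.foldl (fun d m => d.insert m (((PySem.List.index? lst m).getD 0 : Nat) : Int)) PySem.Dict.empty

-- {w: {...} for w in w_pref}; w iterates over the keys, w_pref[w] is the first-match
-- lookup (a key, so the `.getD []` default is never consulted)
def gsRanksA (w_pref : List (String × List String)) : PySem.Dict String (PySem.Dict String Int) :=
  (w_pref.map (fun p => p.1)).foldl
    (fun d w => d.insert w (gsRankRowA ((pvLookup w_pref w).getD []))) PySem.Dict.empty

-- fuel totalizing the two while-loops: strictly more than the number of proposals
-- any run can make (each man m is popped at most (len m_pref[m]) times before Python
-- would raise IndexError); both ports use it, neither loop's code depends on it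
def gsFuel (m_pref : List (String × List String)) : Nat :=
  m_pref.foldl (fun n p => n + p.2.length + 1) 1

-- the while-loop of A; `none` scrutinee branches are exactly where Python raises
-- (KeyError/IndexError), outside Pre_
def gsLoopA (m_pref : List (String × List String))
    (wr : PySem.Dict String (PySem.Dict String Int)) :
    Nat → List String → PySem.Dict String Int → PySem.Dict String String →
    PySem.Dict String String
  | 0, _, _, eng => eng
  | _ + 1, [], _, eng => eng
  | fuel + 1, man :: rest, props, eng =>
    match (pvLookup m_pref man).bind (fun l => PySem.List.pyGet? l (props.getD man 0)) with
    | none => eng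
    | some woman =>
      let props' := props.insert man (props.getD man 0 + 1)
      if eng.contains woman = false then
        gsLoopA m_pref wr fuel rest props' (eng.insert woman man)
      else
        match eng.get? woman with
        | none => eng
        | some cur =>
          match (wr.get? woman).bind (fun r => r.get? man),
                (wr.get? woman).bind (fun r => r.get? cur) with
          | some rm, some rc =>
            if rm < rc then gsLoopA m_pref wr fuel (rest ++ [cur]) props' (eng.insert woman man)
            else gsLoopA m_pref wr fuel (rest ++ [man]) props' eng
          | _, _ => eng

def gale_shapley (m_pref : List (String × List String)) (w_pref : List (String × List String)) : List (String × String) :=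
  let single_men := m_pref.map (fun p => p.1)
  let womens_rank := gsRanksA w_pref
  let proposals := single_men.foldl (fun d m => d.insert m (0 : Int)) PySem.Dict.empty
  (gsLoopA m_pref womens_rank (gsFuel m_pref) single_men proposals PySem.Dict.empty).items

-- ===== PORT B =====

-- for i, m in enumerate(prefs): rank.setdefault(m, i)
def gsRankRowB (prefs : List String) : PySem.Dict String Int :=
  (PySem.List.enumerate prefs).foldl (fun d p => d.setdefault p.2 p.1) PySem.Dict.empty

def gsRanksB (w_pref : List (String × List String)) : PySem.Dict String (PySem.Dict String Int) :=
  w_pref.foldl (fun d p => d.insert p.1 (gsRankRowB p.2)) PySem.Dict.empty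

-- the while-loop of B: the queue carries (man, his still-untried women); `none`/[]
-- scrutinee branches are exactly where Python raises, outside Pre_
def gsLoopB (wr : PySem.Dict String (PySem.Dict String Int)) :
    Nat → List (String × List String) → PySem.Dict String (String × List String) →
    PySem.Dict String (String × List String)
  | 0, _, eng => eng
  | _ + 1, [], eng => eng
  | fuel + 1, (man, prefs) :: rest, eng =>
    match prefs with
    | [] => eng
    | woman :: tl =>
      if eng.contains woman = false then
        gsLoopB wr fuel rest (eng.insert woman (man, tl))
      else
        match eng.get? woman with
        | none => eng
        | some hp =>
          match (wr.get? woman).bind (fun r => r.get? man),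
                (wr.get? woman).bind (fun r => r.get? hp.1) with
          | some rm, some rh =>
            if rm < rh then gsLoopB wr fuel (rest ++ [(hp.1, hp.2)]) (eng.insert woman (man, tl))
            else gsLoopB wr fuel (rest ++ [(man, tl)]) eng
          | _, _ => eng

def gale_shapley_alt (m_pref : List (String × List String)) (w_pref : List (String × List String)) : List (String × String) :=
  let womens_rank := gsRanksB w_pref
  let queue := m_pref.map (fun p => (p.1, p.2))
  let eng := gsLoopB womens_rank (gsFuel m_pref) queue PySem.Dict.empty
  ((eng.items).foldl (fun d p => d.insert p.1 p.2.1) PySem.Dict.empty).items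

-- ===== PRECONDITION & SPEC =====

-- Pre_ keeps the association lists genuine dicts (distinct keys, automatic for real
-- Python dicts) and restricts to instances on which A is guaranteed to return: either
-- a complete marriage instance (each man lists at least |men| distinct women, each
-- listed woman is a key of w_pref whose list contains him) or an instance whose men
-- have pairwise distinct non-empty first choices (then no conflict ever arises).  On
-- other inputs whether A returns or raises KeyError/IndexError depends on the run's
-- trace, which no closed-form condition on the input can express.
def Pre_gale_shapley (m_pref : List (String × List String)) (w_pref : List (String × List String)) : Prop :=
  (m_pref.map (fun p => p.1)).Nodup ∧ (w_pref.map (fun p => p.1)).Nodup ∧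
  ((∀ p ∈ m_pref, m_pref.length ≤ p.2.dedup.length ∧
      ∀ w ∈ p.2, ∃ q ∈ w_pref, q.1 = w ∧ p.1 ∈ q.2)
   ∨ ((∀ p ∈ m_pref, p.2 ≠ []) ∧ (m_pref.map (fun p => p.2.head?)).Nodup))

instance (m_pref : List (String × List String)) (w_pref : List (String × List String)) : Decidable (Pre_gale_shapley m_pref w_pref) := by unfold Pre_gale_shapley; infer_instance

def pvWitness_gale_shapley : (List (String × List String)) × (List (String × List String)) :=
  ([("a", ["x", "y"]), ("b", ["x", "y"])], [("x", ["a", "b"]), ("y", ["b", "a"])])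

def Spec_gale_shapley (m_pref : List (String × List String)) (w_pref : List (String × List String)) (out : List (String × String)) : Prop := out = gale_shapley_alt m_pref w_pref
instance (m_pref : List (String × List String)) (w_pref : List (String × List String)) (out : List (String × String)) : Decidable (Spec_gale_shapley m_pref w_pref out) := by unfold Spec_gale_shapley; infer_instance

-- ===== CLAIM (what is proved, stated in full; the proofs are below) =====
def Claim_equal_gale_shapley : Prop := ∀ (m_pref : List (String × List String)) (w_pref : List (String × List String)), Dom_gale_shapley m_pref w_pref → Pre_gale_shapley m_pref w_pref → Spec_gale_shapley m_pref w_pref (gale_shapley m_pref w_pref)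

-- ===== LEMMAS AND PROOFS =====

-- the remaining-preference suffix of man m, as recorded by A's proposal counter
def gsTail (m_pref : List (String × List String)) (props : PySem.Dict String Int) (m : String) : List String :=
  ((pvLookup m_pref m).getD []).drop (props.getD m 0).toNat

theorem gs_get?_foldl_insert_fn {ν : Type} (f : String → ν) (x : String) :
    ∀ (l : List String) (d : PySem.Dict String ν),
      (l.foldl (fun d m => d.insert m (f m)) d).get? x
        = if x ∈ l then some (f x) else d.get? x := by
  intro l
  induction l with
  | nil => intro d; simp
  | cons m tl ih =>
    intro d
    simp only [List.foldl_cons]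
    rw [ih]
    by_cases hx : x ∈ tl
    · simp [hx]
    · by_cases hxm : x = m
      · simp [hxm]
      · simp [hx, hxm, PySem.Dict.get?_insert]

theorem gs_get?_foldl_setdefault (x : String) :
    ∀ (ps : List (Int × String)) (d : PySem.Dict String Int),
      (ps.foldl (fun d p => d.setdefault p.2 p.1) d).get? x
        = ((d.get? x).orElse (fun _ => (ps.find? (fun p => p.2 == x)).map (fun p => p.1))) := by
  intro ps
  induction ps with
  | nil => intro d; cases h : d.get? x <;> simp [Option.orElse, h]
  | cons a tl ih =>
    intro d
    simp only [List.foldl_cons]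
    rw [ih]
    by_cases hxa : x = a.2
    · subst hxa
      rw [PySem.Dict.get?_setdefault_self]
      cases h : d.get? a.2 <;> simp [Option.orElse]
    · rw [PySem.Dict.get?_setdefault_of_ne _ _ hxa]
      have : (a.2 == x) = false := by simp [Ne.symm hxa]
      simp [this]

theorem gs_find?_enumerate (x : String) :
    ∀ (lst : List String) (s : Int),
      ((PySem.List.enumerate lst s).find? (fun p => p.2 == x)).map (fun p => p.1)
        = (List.idxOf? x lst).map (fun n => s + (n : Int)) := by
  intro lst
  induction lst with
  | nil => intro s; simp [PySem.List.enumerate]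
  | cons m tl ih =>
    intro s
    by_cases hxm : m = x
    · subst hxm
      simp [PySem.List.enumerate, List.idxOf?_cons]
    · have hb : (m == x) = false := by simp [hxm]
      simp only [PySem.List.enumerate, List.find?_cons, hb, List.idxOf?_cons]
      rw [ih]
      cases h : List.idxOf? x tl with
      | none => simp
      | some n => simp; omega

theorem gs_rankRow_pointwise (lst : List String) (x : String) :
    (gsRankRowA lst).get? x = (gsRankRowB lst).get? x := by
  unfold gsRankRowA gsRankRowB
  rw [gs_get?_foldl_insert_fn, gs_get?_foldl_setdefault, PySem.Dict.get?_empty]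
  have h := gs_find?_enumerate x lst 0
  cases h2 : List.idxOf? x lst with
  | some n =>
    have hx : x ∈ lst := by
      by_contra hx
      rw [List.idxOf?_eq_none_iff.mpr hx] at h2; cases h2
    rw [h2] at h
    simp [hx, Option.orElse, h, h2, PySem.List.index?]
  | none =>
    have hx : x ∉ lst := List.idxOf?_eq_none_iff.mp h2
    rw [h2] at h
    simp [hx, Option.orElse, h]

theorem gs_get?_foldl_insert_pairs {ν : Type} (g : List String → ν) (w : String) :
    ∀ (ps : List (String × List String)) (d : PySem.Dict String ν),
      (ps.map (fun p => p.1)).Nodup →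
      (ps.foldl (fun d p => d.insert p.1 (g p.2)) d).get? w
        = (match ps.find? (fun p => p.1 == w) with
           | some p => some (g p.2)
           | none => d.get? w) := by
  intro ps
  induction ps with
  | nil => intro d _; simp
  | cons a tl ih =>
    intro d hnd
    simp only [List.map_cons, List.nodup_cons] at hnd
    simp only [List.foldl_cons]
    rw [ih _ hnd.2]
    by_cases hw : a.1 = w
    · have hfind : tl.find? (fun p => p.1 == w) = none := by
        rw [List.find?_eq_none]
        intro p hp
        simp only [beq_iff_eq]
        intro hpw
        apply hnd.1
        rw [hw, ← hpw]
        exact List.mem_map.mpr ⟨p, hp, rfl⟩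
      simp [hw, hfind]
    · have hb : (a.1 == w) = false := by simp [hw]
      simp only [List.find?_cons, hb]
      cases h : tl.find? (fun p => p.1 == w) with
      | some p => simp
      | none => simp [PySem.Dict.get?_insert, Ne.symm hw]

theorem gs_pvLookup_eq_find? {α : Type} (l : List (String × α)) (k : String) :
    pvLookup l k = (l.find? (fun p => p.1 == k)).map (fun p => p.2) := rfl

theorem gs_ranks_pointwise (w_pref : List (String × List String))
    (hnd : (w_pref.map (fun p => p.1)).Nodup) (w m : String) :
    ((gsRanksA w_pref).get? w).bind (fun r => r.get? m)
      = ((gsRanksB w_pref).get? w).bind (fun r => r.get? m) := by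
  unfold gsRanksA gsRanksB
  rw [gs_get?_foldl_insert_fn, gs_get?_foldl_insert_pairs _ _ _ _ hnd]
  cases hf : w_pref.find? (fun p => p.1 == w) with
  | some q =>
    have hwmem : w ∈ w_pref.map (fun p => p.1) := by
      have hq := List.find?_some hf
      have hqm := List.mem_of_find?_eq_some hf
      simp only [beq_iff_eq] at hq
      exact List.mem_map.mpr ⟨q, hqm, hq⟩
    rw [if_pos hwmem]
    rw [gs_pvLookup_eq_find?, hf]
    simp [gs_rankRow_pointwise]
  | none =>
    have hwmem : w ∉ w_pref.map (fun p => p.1) := by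
      rw [List.find?_eq_none] at hf
      intro hmem
      rcases List.mem_map.mp hmem with ⟨q, hq, hq1⟩
      exact hf q hq (by simp [hq1])
    simp [hwmem]

theorem gs_pvLookup_self {α : Type} :
    ∀ (l : List (String × α)), (l.map (fun p => p.1)).Nodup →
      ∀ p ∈ l, pvLookup l p.1 = some p.2 := by
  intro l
  induction l with
  | nil => intro _ p hp; cases hp
  | cons a tl ih =>
    intro hnd p hp
    simp only [List.map_cons, List.nodup_cons] at hnd
    rcases List.mem_cons.mp hp with hp | hp
    · subst hp; simp [pvLookup]
    · have hne : a.1 ≠ p.1 := by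
        intro h
        exact hnd.1 (h ▸ List.mem_map.mpr ⟨p, hp, rfl⟩)
      have hb : (a.1 == p.1) = false := by simp [hne]
      simpa [pvLookup, List.find?_cons, hb] using ih hnd.2 p hp

-- the scrutinee of A's proposal step is the head of the man's remaining suffix
theorem gs_headA (m_pref : List (String × List String)) (props : PySem.Dict String Int)
    (man : String) (h0 : 0 ≤ props.getD man 0) :
    (pvLookup m_pref man).bind (fun l => PySem.List.pyGet? l (props.getD man 0))
      = (gsTail m_pref props man).head? := by
  unfold gsTail
  cases hl : pvLookup m_pref man with
  | none => simp
  | some l =>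
    have h1 : props.getD man 0 = (((props.getD man 0).toNat : Nat) : Int) := (Int.toNat_of_nonneg h0).symm
    simp only [Option.bind_some, Option.getD_some]
    rw [h1, PySem.List.pyGet?_natCast, List.head?_drop, Int.toNat_natCast]

theorem gs_get?_of_items_map {ν μ : Type} (g : ν → μ) (dA : PySem.Dict String ν)
    (dB : PySem.Dict String μ) (h : dB.items = dA.items.map (fun p => (p.1, g p.2))) (w : String) :
    dB.get? w = (dA.get? w).map g := by
  simp [PySem.Dict.get?, h, List.find?_map, Function.comp_def, Option.map_map]

theorem gs_split {ν : Type} (l : List (String × ν)) (w : String) (cur : ν)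
    (hnd : (l.map (fun p => p.1)).Nodup) (hmem : (w, cur) ∈ l) :
    ∃ s t, l = s ++ (w, cur) :: t ∧ (∀ q ∈ s, q.1 ≠ w) ∧ (∀ q ∈ t, q.1 ≠ w) := by
  rcases List.mem_iff_append.mp hmem with ⟨s, t, rfl⟩
  rw [List.map_append, List.map_cons] at hnd
  rcases List.nodup_append.mp hnd with ⟨h1, h2, h3⟩
  refine ⟨s, t, rfl, ?_, ?_⟩
  · intro q hq hqw
    exact h3 q.1 (List.mem_map.mpr ⟨q, hq, rfl⟩) w (by simp) hqw
  · intro q hq hqw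
    exact (List.nodup_cons.mp h2).1 (hqw ▸ List.mem_map.mpr ⟨q, hq, rfl⟩)

theorem gs_items_insert_split {ν : Type} (d : PySem.Dict String ν) (w : String) (cur v : ν)
    (s t : List (String × ν)) (hitems : d.items = s ++ (w, cur) :: t)
    (hs : ∀ q ∈ s, q.1 ≠ w) (ht : ∀ q ∈ t, q.1 ≠ w) :
    (d.insert w v).items = s ++ (w, v) :: t := by
  have hcont : d.contains w = true := by
    rw [PySem.Dict.contains_iff_mem_keys]
    simp [PySem.Dict.keys, hitems]
  rw [PySem.Dict.items_insert_of_contains _ _ hcont, hitems]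
  simp only [List.map_append, List.map_cons]
  rw [List.map_congr_left (g := id) (by intro q hq; simp [hs q hq]), List.map_id,
      List.map_congr_left (g := id) (by intro q hq; simp [ht q hq]), List.map_id]
  simp

theorem gs_perm_move (a b : String) (r s t : List String) :
    ((r ++ [b]) ++ (s ++ a :: t)).Perm ((a :: r) ++ (s ++ b :: t)) := by
  rw [List.perm_iff_count]
  intro x
  simp [List.count_append, List.count_cons]
  ring

theorem gs_perm_rot (a : String) (r v : List String) :
    ((r ++ [a]) ++ v).Perm (a :: (r ++ v)) := by
  rw [List.perm_iff_count]
  intro x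
  simp [List.count_append, List.count_cons]
  ring

theorem gs_strip (l : List (String × String)) (t : String → List String) :
    (l.map (fun p => (p.1, (p.2, t p.2)))).map (fun p => ((p.1 : String), p.2.1)) = l := by
  rw [List.map_map]
  rw [show ((fun p : String × (String × List String) => (p.1, p.2.1))
        ∘ (fun p : String × String => (p.1, (p.2, t p.2)))) = id from rfl]
  exact List.map_id l

theorem gs_sim (m_pref : List (String × List String))
    (wrA wrB : PySem.Dict String (PySem.Dict String Int))
    (hwr : ∀ w m, (wrA.get? w).bind (fun r => r.get? m) = (wrB.get? w).bind (fun r => r.get? m)) :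
    ∀ (fuel : Nat) (qA : List String) (props : PySem.Dict String Int)
      (engA : PySem.Dict String String) (engB : PySem.Dict String (String × List String)),
      (∀ m, 0 ≤ props.getD m 0) →
      engB.items = engA.items.map (fun p => (p.1, (p.2, gsTail m_pref props p.2))) →
      (qA ++ engA.values).Nodup →
      engA.keys.Nodup →
      (gsLoopB wrB fuel (qA.map (fun m => (m, gsTail m_pref props m))) engB).items.map
          (fun p => (p.1, p.2.1))
        = (gsLoopA m_pref wrA fuel qA props engA).items
      ∧ (gsLoopA m_pref wrA fuel qA props engA).keys.Nodup := by
  intro fuel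
  induction fuel with
  | zero =>
    intro qA props engA engB hpos hitems hmen hkeys
    refine ⟨?_, by simpa [gsLoopA] using hkeys⟩
    simp only [gsLoopA, gsLoopB]
    rw [hitems, gs_strip]
  | succ fuel ih =>
    intro qA props engA engB hpos hitems hmen hkeys
    cases qA with
    | nil =>
      refine ⟨?_, by simpa [gsLoopA] using hkeys⟩
      simp only [List.map_nil, gsLoopA, gsLoopB]
      rw [hitems, gs_strip]
    | cons man rest =>
      have hmenc : (man :: (rest ++ engA.values)).Nodup := by simpa using hmen
      have hman_rest : man ∉ rest :=
        fun h => (List.nodup_cons.mp hmenc).1 (List.mem_append.mpr (Or.inl h))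
      have hman_vals : man ∉ engA.values :=
        fun h => (List.nodup_cons.mp hmenc).1 (List.mem_append.mpr (Or.inr h))
      have hhead := gs_headA m_pref props man (hpos man)
      have hkeysB : engB.keys = engA.keys := by
        simp [PySem.Dict.keys, hitems, List.map_map, Function.comp_def]
      have hkeysBnd : engB.keys.Nodup := by rw [hkeysB]; exact hkeys
      simp only [List.map_cons, gsLoopA, gsLoopB]
      rw [hhead]
      cases htail : gsTail m_pref props man with
      | nil =>
        simp only [List.head?_nil]
        refine ⟨?_, hkeys⟩
        rw [hitems, gs_strip]
      | cons woman tl =>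
        simp only [List.head?_cons]
        -- the incremented proposal counter
        have hT' : ∀ m, m ≠ man →
            gsTail m_pref (props.insert man (props.getD man 0 + 1)) m = gsTail m_pref props m := by
          intro m hm
          simp [gsTail, PySem.Dict.getD_insert, hm]
        have hTman : gsTail m_pref (props.insert man (props.getD man 0 + 1)) man = tl := by
          unfold gsTail at htail ⊢
          rw [PySem.Dict.getD_insert, if_pos rfl]
          have h1 : (props.getD man 0 + 1).toNat = (props.getD man 0).toNat + 1 := by
            have := hpos man; omega
          rw [h1, ← List.tail_drop, htail]
          rfl
        have hpos' : ∀ m, 0 ≤ (props.insert man (props.getD man 0 + 1)).getD m 0 := by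
          intro m
          rw [PySem.Dict.getD_insert]
          split
          · have := hpos man; omega
          · exact hpos m
        have hrestmap : rest.map (fun m => (m, gsTail m_pref props m))
            = rest.map (fun m => (m, gsTail m_pref (props.insert man (props.getD man 0 + 1)) m)) := by
          apply List.map_congr_left
          intro m hm
          rw [hT' m (fun h => hman_rest (h ▸ hm))]
        have hcontB : engB.contains woman = engA.contains woman := by
          rw [PySem.Dict.contains_eq_decide_mem_keys, PySem.Dict.contains_eq_decide_mem_keys, hkeysB]
        by_cases hc : engA.contains woman = false
        · -- woman is free: both engage her
          simp only [hcontB, hc]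
          rw [hrestmap]
          have hnewitems : (engB.insert woman (man, tl)).items
              = ((engA.insert woman man).items).map
                  (fun p => (p.1, (p.2, gsTail m_pref (props.insert man (props.getD man 0 + 1)) p.2))) := by
            rw [PySem.Dict.items_insert_of_not_contains _ _ (hcontB.trans hc),
                PySem.Dict.items_insert_of_not_contains _ _ hc]
            rw [List.map_append, hitems, List.map_cons, List.map_nil, hTman]
            congr 1
            apply List.map_congr_left
            intro p hp
            have hpv : p.2 ∈ engA.values := List.mem_map.mpr ⟨p, hp, rfl⟩
            rw [hT' p.2 (fun h => hman_vals (h ▸ hpv))]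
          have hvalsnew : (engA.insert woman man).values = engA.values ++ [man] := by
            simp [PySem.Dict.values, PySem.Dict.items_insert_of_not_contains _ _ hc]
          have hmen2 : (rest ++ (engA.insert woman man).values).Nodup := by
            rw [hvalsnew]
            have hperm := gs_perm_rot man rest engA.values
            have : ((rest ++ [man]) ++ engA.values).Nodup := hperm.symm.nodup (by simpa using hmenc)
            have hp2 : ((rest ++ [man]) ++ engA.values).Perm (rest ++ (engA.values ++ [man])) := by
              rw [List.perm_iff_count]; intro x
              simp [List.count_append, List.count_cons]
            exact hp2.nodup this
          exact ih rest (props.insert man (props.getD man 0 + 1)) (engA.insert woman man)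
            (engB.insert woman (man, tl)) hpos' hnewitems hmen2
            (PySem.Dict.nodup_keys_insert _ _ _ hkeys)
        · -- woman already engaged
          have hc' : engA.contains woman = true := by
            cases h : engA.contains woman
            · exact absurd h hc
            · rfl
          obtain ⟨cur, hg⟩ : ∃ cur, engA.get? woman = some cur := by
            cases h : engA.get? woman with
            | none => rw [PySem.Dict.get?_eq_none_iff_contains] at h; rw [h] at hc'; cases hc'
            | some cur => exact ⟨cur, rfl⟩
          have hgB : engB.get? woman = some (cur, gsTail m_pref props cur) := by
            rw [gs_get?_of_items_map (fun m => (m, gsTail m_pref props m)) engA engB hitems, hg]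
            rfl
          have hcurv : cur ∈ engA.values := by
            have := PySem.Dict.mem_items_of_get?_eq_some engA hg
            exact List.mem_map.mpr ⟨(woman, cur), this, rfl⟩
          have hcurne : cur ≠ man := fun h => hman_vals (h ▸ hcurv)
          simp only [hcontB, hc', Bool.true_eq_false, if_false, hg, hgB]
          rw [← hwr woman man, ← hwr woman cur]
          cases hrm : (wrA.get? woman).bind (fun r => r.get? man) with
          | none =>
            refine ⟨?_, hkeys⟩
            show engB.items.map (fun p => ((p.1 : String), p.2.1)) = engA.items
            rw [hitems, gs_strip]
          | some rm =>
            cases hrc : (wrA.get? woman).bind (fun r => r.get? cur) with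
            | none =>
              refine ⟨?_, hkeys⟩
              show engB.items.map (fun p => ((p.1 : String), p.2.1)) = engA.items
              rw [hitems, gs_strip]
            | some rc =>
              show ((if rm < rc then
                      gsLoopB wrB fuel (List.map (fun m => (m, gsTail m_pref props m)) rest
                        ++ [(cur, gsTail m_pref props cur)]) (engB.insert woman (man, tl))
                    else
                      gsLoopB wrB fuel (List.map (fun m => (m, gsTail m_pref props m)) rest
                        ++ [(man, tl)]) engB).items.map (fun p => (p.1, p.2.1))
                  = (if rm < rc then
                      gsLoopA m_pref wrA fuel (rest ++ [cur]) (props.insert man (props.getD man 0 + 1)) (engA.insert woman man)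
                    else
                      gsLoopA m_pref wrA fuel (rest ++ [man]) (props.insert man (props.getD man 0 + 1)) engA).items)
                ∧ (if rm < rc then
                      gsLoopA m_pref wrA fuel (rest ++ [cur]) (props.insert man (props.getD man 0 + 1)) (engA.insert woman man)
                    else
                      gsLoopA m_pref wrA fuel (rest ++ [man]) (props.insert man (props.getD man 0 + 1)) engA).keys.Nodup
              obtain ⟨s, t, hsplit, hsW, htW⟩ :=
                gs_split engA.items woman cur hkeys (PySem.Dict.mem_items_of_get?_eq_some engA hg)
              have hvals_eq : engA.values
                  = s.map (fun p => p.2) ++ cur :: t.map (fun p => p.2) := by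
                simp [PySem.Dict.values, hsplit]
              by_cases hlt : rm < rc
              · -- the holder cur is dumped
                rw [if_pos hlt, if_pos hlt]
                have hTcur : gsTail m_pref (props.insert man (props.getD man 0 + 1)) cur
                    = gsTail m_pref props cur := hT' cur hcurne
                have hq2 : rest.map (fun m => (m, gsTail m_pref props m)) ++ [(cur, gsTail m_pref props cur)]
                    = (rest ++ [cur]).map
                        (fun m => (m, gsTail m_pref (props.insert man (props.getD man 0 + 1)) m)) := by
                  rw [List.map_append, hrestmap, List.map_cons, List.map_nil, hTcur]
                have hitemsB : engB.items
                    = s.map (fun p => (p.1, (p.2, gsTail m_pref props p.2)))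
                      ++ (woman, (cur, gsTail m_pref props cur))
                        :: t.map (fun p => (p.1, (p.2, gsTail m_pref props p.2))) := by
                  rw [hitems, hsplit]; simp
                have hnewA : (engA.insert woman man).items = s ++ (woman, man) :: t :=
                  gs_items_insert_split engA woman cur man s t hsplit hsW htW
                have hnewB : (engB.insert woman (man, tl)).items
                    = s.map (fun p => (p.1, (p.2, gsTail m_pref props p.2)))
                      ++ (woman, (man, tl))
                        :: t.map (fun p => (p.1, (p.2, gsTail m_pref props p.2))) := by
                  apply gs_items_insert_split _ _ (cur, gsTail m_pref props cur) _ _ _ hitemsB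
                  · intro q hq
                    rcases List.mem_map.mp hq with ⟨p, hp, rfl⟩
                    exact hsW p hp
                  · intro q hq
                    rcases List.mem_map.mp hq with ⟨p, hp, rfl⟩
                    exact htW p hp
                have hnewitems : (engB.insert woman (man, tl)).items
                    = ((engA.insert woman man).items).map
                        (fun p => (p.1, (p.2, gsTail m_pref (props.insert man (props.getD man 0 + 1)) p.2))) := by
                  rw [hnewB, hnewA, List.map_append, List.map_cons, hTman]
                  congr 1
                  · apply List.map_congr_left
                    intro p hp
                    have hpv : p.2 ∈ engA.values := by
                      rw [hvals_eq]
                      exact List.mem_append.mpr (Or.inl (List.mem_map.mpr ⟨p, hp, rfl⟩))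
                    rw [hT' p.2 (fun h => hman_vals (h ▸ hpv))]
                  · congr 1
                    apply List.map_congr_left
                    intro p hp
                    have hpv : p.2 ∈ engA.values := by
                      rw [hvals_eq]
                      exact List.mem_append.mpr (Or.inr (List.mem_cons.mpr (Or.inr (List.mem_map.mpr ⟨p, hp, rfl⟩))))
                    rw [hT' p.2 (fun h => hman_vals (h ▸ hpv))]
                have hvalsnew : (engA.insert woman man).values
                    = s.map (fun p => p.2) ++ man :: t.map (fun p => p.2) := by
                  simp [PySem.Dict.values, hnewA]
                have hmen2 : ((rest ++ [cur]) ++ (engA.insert woman man).values).Nodup := by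
                  rw [hvalsnew]
                  have hperm := gs_perm_move man cur rest (s.map (fun p => p.2)) (t.map (fun p => p.2))
                  apply hperm.symm.nodup
                  rw [← hvals_eq]
                  simpa using hmenc
                rw [hq2]
                exact ih (rest ++ [cur]) (props.insert man (props.getD man 0 + 1))
                  (engA.insert woman man) (engB.insert woman (man, tl)) hpos' hnewitems hmen2
                  (PySem.Dict.nodup_keys_insert _ _ _ hkeys)
              · -- the proposer is rejected
                rw [if_neg hlt, if_neg hlt]

                have hq2 : rest.map (fun m => (m, gsTail m_pref props m)) ++ [(man, tl)]
                    = (rest ++ [man]).map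
                        (fun m => (m, gsTail m_pref (props.insert man (props.getD man 0 + 1)) m)) := by
                  rw [List.map_append, hrestmap, List.map_cons, List.map_nil, hTman]
                have hnewitems : engB.items
                    = engA.items.map
                        (fun p => (p.1, (p.2, gsTail m_pref (props.insert man (props.getD man 0 + 1)) p.2))) := by
                  rw [hitems]
                  apply List.map_congr_left
                  intro p hp
                  have hpv : p.2 ∈ engA.values := List.mem_map.mpr ⟨p, hp, rfl⟩
                  rw [hT' p.2 (fun h => hman_vals (h ▸ hpv))]
                have hmen2 : ((rest ++ [man]) ++ engA.values).Nodup := by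
                  apply (gs_perm_rot man rest engA.values).symm.nodup
                  simpa using hmenc
                rw [hq2]
                exact ih (rest ++ [man]) (props.insert man (props.getD man 0 + 1))
                  engA engB hpos' hnewitems hmen2 hkeys

theorem gale_shapley_equal (m_pref : List (String × List String)) (w_pref : List (String × List String))
    (hpre : Pre_gale_shapley m_pref w_pref) :
    gale_shapley m_pref w_pref = gale_shapley_alt m_pref w_pref := by
  obtain ⟨hmnd, hwnd, -⟩ := hpre
  have hprops0 : ∀ m, ((m_pref.map (fun p => p.1)).foldl
      (fun d m => d.insert m (0 : Int)) PySem.Dict.empty).getD m 0 = 0 := by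
    intro m
    rw [PySem.Dict.getD_eq_get?_getD, gs_get?_foldl_insert_fn (fun _ => (0 : Int))]
    by_cases h : m ∈ m_pref.map (fun p => p.1) <;> simp [h]
  have hpos0 : ∀ m, 0 ≤ ((m_pref.map (fun p => p.1)).foldl
      (fun d m => d.insert m (0 : Int)) PySem.Dict.empty).getD m 0 := by
    intro m; rw [hprops0]
  have htail0 : ∀ p ∈ m_pref,
      gsTail m_pref ((m_pref.map (fun p => p.1)).foldl
        (fun d m => d.insert m (0 : Int)) PySem.Dict.empty) p.1 = p.2 := by
    intro p hp
    unfold gsTail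
    rw [hprops0, gs_pvLookup_self m_pref hmnd p hp]
    simp
  have hq0 : m_pref.map (fun p => (p.1, p.2))
      = (m_pref.map (fun p => p.1)).map (fun m => (m, gsTail m_pref
          ((m_pref.map (fun p => p.1)).foldl (fun d m => d.insert m (0 : Int)) PySem.Dict.empty) m)) := by
    rw [List.map_map]
    apply List.map_congr_left
    intro p hp
    simp only [Function.comp]
    rw [htail0 p hp]
  have hsim := gs_sim m_pref (gsRanksA w_pref) (gsRanksB w_pref)
      (gs_ranks_pointwise w_pref hwnd) (gsFuel m_pref) (m_pref.map (fun p => p.1))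
      ((m_pref.map (fun p => p.1)).foldl (fun d m => d.insert m (0 : Int)) PySem.Dict.empty)
      PySem.Dict.empty PySem.Dict.empty hpos0 (by rfl) (by simpa [PySem.Dict.values, PySem.Dict.empty] using hmnd)
      (by simp [PySem.Dict.keys, PySem.Dict.empty])
  rw [← hq0] at hsim
  rcases hsim with ⟨heq, hknd⟩
  simp only [gale_shapley, gale_shapley_alt]
  have hkeysE : ((gsLoopB (gsRanksB w_pref) (gsFuel m_pref)
      (m_pref.map (fun p => (p.1, p.2))) PySem.Dict.empty).items.map (fun p => p.1)).Nodup := by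
    have h1 : (gsLoopB (gsRanksB w_pref) (gsFuel m_pref)
        (m_pref.map (fun p => (p.1, p.2))) PySem.Dict.empty).items.map (fun p => p.1)
        = (gsLoopA m_pref (gsRanksA w_pref) (gsFuel m_pref) (m_pref.map (fun p => p.1))
            ((m_pref.map (fun p => p.1)).foldl (fun d m => d.insert m (0 : Int)) PySem.Dict.empty)
            PySem.Dict.empty).items.map (fun p => p.1) := by
      rw [← heq, List.map_map]
      rfl
    rw [h1]
    exact hknd
  have hfold := PySem.Dict.items_foldl_insert_fresh
      (l := (gsLoopB (gsRanksB w_pref) (gsFuel m_pref)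
        (m_pref.map (fun p => (p.1, p.2))) PySem.Dict.empty).items)
      (k := fun p => p.1) (v := fun p => p.2.1) (d := PySem.Dict.empty)
      (by intro a _; exact PySem.Dict.contains_empty _) hkeysE
  rw [hfold]
  simpa [PySem.Dict.empty] using heq.symm

-- ===== VERDICT (by name: the statement is the Claim_ definition above) =====
theorem gale_shapley_spec : Claim_equal_gale_shapley := by
  intro m_pref w_pref _ hpre
  unfold Spec_gale_shapley
  exact gale_shapley_equal m_pref w_pref hpre
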